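-- pv_equiv track=rewrite | github.com/harishapy/kaizen | kaizen/helpers/output.py | create_pr_review_from_json
-- ===== SOURCE A (Python) =====
-- PR_COLLAPSIBLE_TEMPLATE = """
-- <details>
-- <summary>{comment}</summary>
--
-- ##### Reason
-- {reasoning}
--
-- ##### Confidence
-- {confidence}
-- </details>
-- """
--
-- def merge_topics(reviews):
--     topics = {}
--     for review in reviews:
--         if review["topic"] in topics:
--             topics[review["topic"]].append(review)
--         else:
--             topics[review["topic"]] = [review]
--     return topics
--
-- def create_pr_review_from_json(reviews):
--     markdown_output = "## Code Review Feedback\n\n"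
--
--     topics = merge_topics(reviews)
--
--     for topic, reviews in topics.items():
--         markdown_output += f"### {topic}\n\n"
--         for review in reviews:
--             ct = PR_COLLAPSIBLE_TEMPLATE.format(
--                 comment=review.get("comment", "NA"),
--                 reasoning=review.get("reasoning", "NA"),
--                 confidence=review.get("confidence", "NA"),
--             )
--             markdown_output += ct + "\n"
--
--     return markdown_output
-- ===== SOURCE B (Python) =====
-- PR_COLLAPSIBLE_TEMPLATE = """
-- <details>
-- <summary>{comment}</summary>
--
-- ##### Reason
-- {reasoning}
--
-- ##### Confidence
-- {confidence}
-- </details>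
-- """
--
--
-- def create_pr_review_from_json(reviews):
--     # ordered list of distinct topics (first-appearance order)
--     topics = []
--     for review in reviews:
--         if review["topic"] not in topics:
--             topics.append(review["topic"])
--
--     markdown_output = "## Code Review Feedback\n\n"
--     for topic in topics:
--         markdown_output += f"### {topic}\n\n"
--         for review in reviews:
--             if review["topic"] == topic:
--                 ct = PR_COLLAPSIBLE_TEMPLATE.format(
--                     comment=review.get("comment", "NA"),
--                     reasoning=review.get("reasoning", "NA"),
--                     confidence=review.get("confidence", "NA"),
--                 )
--                 markdown_output += ct + "\n"
--     return markdown_output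
-- ===== Notes on version B (the rewrite author's own statement) =====
-- stated objective: alternative
-- what changed: Drops the intermediate grouping dict entirely: B computes the ordered list of distinct topics in one pass and then, per topic, rescans the whole review list selecting matching reviews, instead of building a topic->reviews index first and iterating its items.
import Mathlib
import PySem

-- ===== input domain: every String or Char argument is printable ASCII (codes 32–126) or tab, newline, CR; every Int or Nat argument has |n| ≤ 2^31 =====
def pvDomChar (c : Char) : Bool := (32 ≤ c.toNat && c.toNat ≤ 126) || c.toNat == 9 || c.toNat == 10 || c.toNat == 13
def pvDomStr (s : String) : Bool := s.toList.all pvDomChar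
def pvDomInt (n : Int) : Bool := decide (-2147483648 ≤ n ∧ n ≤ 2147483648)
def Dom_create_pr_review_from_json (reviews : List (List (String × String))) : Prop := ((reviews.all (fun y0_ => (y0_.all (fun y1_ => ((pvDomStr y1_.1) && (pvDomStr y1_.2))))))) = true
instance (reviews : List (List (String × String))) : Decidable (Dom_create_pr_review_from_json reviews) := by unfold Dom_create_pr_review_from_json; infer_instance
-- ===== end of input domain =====

-- B drops A's grouping dict: it lists the distinct topics in order of first appearance and
-- rescans the whole review list once per topic; same output, a differently-shaped traversal.


-- ===== PORT A =====
-- review["topic"]: first-match lookup on the review dict; exact under Pre_ (the key is present)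
def pvTopic (review : List (String × String)) : String :=
  (PySem.Dict.mk review).getD "topic" ""

-- PR_COLLAPSIBLE_TEMPLATE.format(comment=…, reasoning=…, confidence=…) with the .get(…, "NA") defaults
def pvFmt (review : List (String × String)) : String :=
  "\n<details>\n<summary>" ++ (PySem.Dict.mk review).getD "comment" "NA" ++
  "</summary>\n\n##### Reason\n" ++ (PySem.Dict.mk review).getD "reasoning" "NA" ++
  "\n\n##### Confidence\n" ++ (PySem.Dict.mk review).getD "confidence" "NA" ++
  "\n</details>\n"

def merge_topics (reviews : List (List (String × String))) :
    PySem.Dict String (List (List (String × String))) :=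
  reviews.foldl
    (fun topics review =>
      if topics.contains (pvTopic review) then
        topics.modify (pvTopic review) [] (fun rs => rs ++ [review])
      else
        topics.insert (pvTopic review) [review])
    PySem.Dict.empty

def create_pr_review_from_json (reviews : List (List (String × String))) : String :=
  (merge_topics reviews).items.foldl
    (fun md tp =>
      tp.2.foldl (fun md review => md ++ (pvFmt review ++ "\n"))
        (md ++ ("### " ++ tp.1 ++ "\n\n")))
    "## Code Review Feedback\n\n"

-- ===== PORT B =====
def create_pr_review_from_json_alt (reviews : List (List (String × String))) : String :=
  let topics : PySem.Set String :=
    reviews.foldl (fun ts review => ts.add (pvTopic review)) PySem.Set.empty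
  topics.foldl
    (fun md topic =>
      reviews.foldl
        (fun md review =>
          if pvTopic review == topic then md ++ (pvFmt review ++ "\n") else md)
        (md ++ ("### " ++ topic ++ "\n\n")))
    "## Code Review Feedback\n\n"

-- ===== PRECONDITION & SPEC =====
-- Pre_ excludes reviews without a "topic" key, on which the Python raises KeyError.
def Pre_create_pr_review_from_json (reviews : List (List (String × String))) : Prop :=
  ∀ review ∈ reviews, "topic" ∈ review.map Prod.fst
instance (reviews : List (List (String × String))) : Decidable (Pre_create_pr_review_from_json reviews) := by unfold Pre_create_pr_review_from_json; infer_instance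

def pvWitness_create_pr_review_from_json : (List (List (String × String))) :=
  [[("topic", "style"), ("comment", "ok")], [("topic", "perf")], [("topic", "style")]]

def Spec_create_pr_review_from_json (reviews : List (List (String × String))) (out : String) : Prop := out = create_pr_review_from_json_alt reviews
instance (reviews : List (List (String × String))) (out : String) : Decidable (Spec_create_pr_review_from_json reviews out) := by unfold Spec_create_pr_review_from_json; infer_instance

-- ===== CLAIM (what is proved, stated in full; the proofs are below) =====
def Claim_equal_create_pr_review_from_json : Prop := ∀ (reviews : List (List (String × String))), Dom_create_pr_review_from_json reviews → Pre_create_pr_review_from_json reviews → Spec_create_pr_review_from_json reviews (create_pr_review_from_json reviews)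

-- ===== LEMMAS AND PROOFS =====

-- A's two dict branches are both one `modify`.
theorem merge_topics_eq_modify_fold (reviews : List (List (String × String))) :
    merge_topics reviews =
      (reviews.map (fun r => (pvTopic r, r))).foldl
        (fun d p => d.modify p.1 [] (fun rs => rs ++ [p.2])) PySem.Dict.empty := by
  rw [merge_topics, List.foldl_map]
  congr 1
  funext d r
  by_cases h : d.contains (pvTopic r) = true
  · simp [h]
  · simp only [Bool.not_eq_true] at h
    simp [h, PySem.Dict.modify, PySem.Dict.getD_of_not_contains _ _ h]

-- filter at an absent key is empty
theorem filter_eq_nil_of_not_mem_fst {κ ν : Type} [BEq κ] [LawfulBEq κ]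
    (l : List (κ × ν)) (k : κ) (h : k ∉ l.map Prod.fst) :
    l.filter (fun q => q.1 == k) = [] := by
  rw [List.filter_eq_nil_iff]
  intro q hq hk
  exact h (List.mem_map.mpr ⟨q, hq, by simpa using hk⟩)

-- items of the grouping fold: distinct keys in first-appearance order, each with the
-- sublist of its values in original order.
theorem items_group {κ ν : Type} [BEq κ] [LawfulBEq κ] (l : List (κ × ν)) :
    (l.foldl (fun d p => d.modify p.1 [] (fun rs => rs ++ [p.2])) PySem.Dict.empty).items =
      (PySem.Set.ofList (l.map Prod.fst)).map
        (fun k => (k, (l.filter (fun q => q.1 == k)).map Prod.snd)) := by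
  induction l using List.reverseRecOn with
  | nil => rfl
  | append_singleton l p ih =>
    rw [List.foldl_append, List.foldl_cons, List.foldl_nil]
    have hkeys : (l.foldl (fun d p => d.modify p.1 [] (fun rs => rs ++ [p.2]))
        PySem.Dict.empty).keys = PySem.Set.ofList (l.map Prod.fst) := by
      simp [PySem.Dict.keys, ih, Function.comp_def]
    have hgetD : (l.foldl (fun d p => d.modify p.1 [] (fun rs => rs ++ [p.2]))
        PySem.Dict.empty).getD p.1 [] = (l.filter (fun q => q.1 == p.1)).map Prod.snd := by
      simpa using PySem.Dict.getD_foldl_modify_append l PySem.Dict.empty p.1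
    rw [PySem.Dict.modify, hgetD]
    by_cases hc : (l.foldl (fun d p => d.modify p.1 [] (fun rs => rs ++ [p.2]))
        PySem.Dict.empty).contains p.1 = true
    · have hmemS : p.1 ∈ PySem.Set.ofList (l.map Prod.fst) := by
        rw [← hkeys]; exact (PySem.Dict.contains_iff_mem_keys _ _).mp hc
      have hS : PySem.Set.ofList ((l ++ [p]).map Prod.fst)
          = PySem.Set.ofList (l.map Prod.fst) := by
        rw [List.map_append]
        simp [PySem.Set.ofList, PySem.Set.add]
        exact hmemS
      rw [PySem.Dict.items_insert_of_contains _ _ hc, ih, hS, List.map_map]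
      apply List.map_congr_left
      intro k hk
      by_cases hkp : k = p.1
      · subst hkp
        simp [List.filter_append]
      · have : (k == p.1) = false := by simpa using hkp
        simp [Function.comp, this, List.filter_append,
          show (p.1 == k) = false by simpa using fun h => hkp h.symm]
    · simp only [Bool.not_eq_true] at hc
      have hnmemS : p.1 ∉ PySem.Set.ofList (l.map Prod.fst) := by
        rw [← hkeys]
        intro hmem
        rw [(PySem.Dict.contains_iff_mem_keys _ _).mpr hmem] at hc
        exact Bool.true_eq_false ▸ hc
      have hnmem : p.1 ∉ l.map Prod.fst := by
        intro h; exact hnmemS ((PySem.Set.mem_ofList _ _).mpr h)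
      have hS : PySem.Set.ofList ((l ++ [p]).map Prod.fst)
          = PySem.Set.ofList (l.map Prod.fst) ++ [p.1] := by
        rw [List.map_append]
        simp [PySem.Set.ofList, PySem.Set.add]
        exact hnmemS
      rw [PySem.Dict.items_insert_of_not_contains _ _ hc, ih, hS,
        filter_eq_nil_of_not_mem_fst l p.1 hnmem, List.map_append]
      congr 1
      · apply List.map_congr_left
        intro k hk
        have hkp : k ≠ p.1 := fun h => hnmemS (h ▸ hk)
        simp [List.filter_append, show (p.1 == k) = false by simpa using fun h => hkp h.symm]
      · simp only [List.map_cons, List.map_nil, List.filter_append,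
          filter_eq_nil_of_not_mem_fst l p.1 hnmem]
        simp

-- B's inner scan over all reviews equals A's fold over the topic's group.
theorem inner_scan_eq (reviews : List (List (String × String))) (t md : String) :
    reviews.foldl
      (fun md review =>
        if pvTopic review == t then md ++ (pvFmt review ++ "\n") else md) md
    = (((reviews.map (fun r => (pvTopic r, r))).filter (fun q => q.1 == t)).map
        Prod.snd).foldl (fun md review => md ++ (pvFmt review ++ "\n")) md := by
  rw [List.filter_map, List.map_map, ← List.foldl_filter]
  simp [Function.comp_def]

-- ===== VERDICT (by name: the statement is the Claim_ definition above) =====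
theorem create_pr_review_from_json_spec : Claim_equal_create_pr_review_from_json := by
  intro reviews _ _
  unfold Spec_create_pr_review_from_json
  rw [create_pr_review_from_json, create_pr_review_from_json_alt,
    merge_topics_eq_modify_fold, items_group, List.foldl_map]
  rw [show (fun (ts : PySem.Set String) review => ts.add (pvTopic review))
      = (fun ts r => PySem.Set.add ts (pvTopic r)) from rfl]
  rw [show reviews.foldl (fun (ts : PySem.Set String) r => PySem.Set.add ts (pvTopic r))
      PySem.Set.empty = PySem.Set.ofList (reviews.map pvTopic) by
    rw [PySem.Set.ofList, List.foldl_map]]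
  rw [show (reviews.map (fun r => (pvTopic r, r))).map Prod.fst = reviews.map pvTopic by
    simp [List.map_map]]
  congr 1
  funext md t
  rw [inner_scan_eq]
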